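-- pv_equiv track=rewrite | github.com/wkdtpwjd/Programmers | 프로그래머스/4/62050. 지형 이동/지형 이동.py | solution
-- ===== SOURCE A (Python) =====
-- import heapq # 최소비용찾는거니까 힙큐사용하기
--
-- di = [-1,0,1,0]
--
-- dj = [0,1,0,-1]
--
-- def solution(land,height):
--     total_cost = 0
--     n = len(land)
--     visited = [[False] * n for _ in range(n)]
--     heap = [(0,0,0)] # 최소비용이니까 비용이 첫번재 요소로 가도록(비용,시작좌표)
--     while heap:
--         current_cost,i,j = heapq.heappop(heap)
--         if not visited[i][j]:
--             visited[i][j] = True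
--             total_cost += current_cost
--             for d in range(4):
--                 ni = i +di[d]
--                 nj = j +dj[d]
--                 if 0<=ni<n and 0<=nj<n :
--                     tem_cost = abs(land[i][j]-land[ni][nj])
--                     if tem_cost <= height:
--                         new_cost = 0
--                     else:
--                         new_cost = tem_cost
--                     heapq.heappush(heap,[new_cost,ni,nj])
--
--     return total_cost
-- ===== SOURCE B (Python) =====
-- def solution(land, height):
--     n = len(land)
--     total_cost = 0
--     visited = set()
--     best = {(0, 0): 0}  # frontier: cheapest known cost to attach each cell to the tree
--     for _ in range(n * n):
--         if not best:
--             break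
--         (i, j), c = min(best.items(), key=lambda kv: (kv[1], kv[0]))
--         del best[(i, j)]
--         visited.add((i, j))
--         total_cost += c
--         for ni, nj in ((i - 1, j), (i, j + 1), (i + 1, j), (i, j - 1)):
--             if 0 <= ni < n and 0 <= nj < n and (ni, nj) not in visited:
--                 d = abs(land[i][j] - land[ni][nj])
--                 nc = 0 if d <= height else d
--                 if (ni, nj) not in best or nc < best[(ni, nj)]:
--                     best[(ni, nj)] = nc
--     return total_cost
-- ===== Notes on version B (the rewrite author's own statement) =====
-- stated objective: alternative
-- what changed: A's lazy-deletion heapq Prim (push every offer, pop-and-skip stale entries) is replaced by a dense decrease-key Prim: a dict keeps the single best connection cost per frontier cell, each round the lexicographically least (cost,i,j) frontier item is selected and its neighbours' dict entries are updated in place, so no heap, no duplicate entries and no visited-skip branch exist.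
import Mathlib
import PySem

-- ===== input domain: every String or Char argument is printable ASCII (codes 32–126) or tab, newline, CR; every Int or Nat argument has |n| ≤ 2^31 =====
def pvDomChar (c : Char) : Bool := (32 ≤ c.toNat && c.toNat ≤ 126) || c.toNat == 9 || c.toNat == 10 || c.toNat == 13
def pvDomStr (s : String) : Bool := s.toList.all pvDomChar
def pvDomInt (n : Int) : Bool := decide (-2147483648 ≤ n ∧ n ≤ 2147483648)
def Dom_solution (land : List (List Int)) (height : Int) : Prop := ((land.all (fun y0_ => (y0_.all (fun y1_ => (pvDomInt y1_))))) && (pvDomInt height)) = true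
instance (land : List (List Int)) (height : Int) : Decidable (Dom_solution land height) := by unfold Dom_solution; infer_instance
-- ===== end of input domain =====

-- B replaces A's lazy-deletion heapq Prim by a dense decrease-key Prim (dict of best frontier
-- costs + visited set, bounded loop); objective: alternative (not faster).

-- ===== PORT A =====
-- module constants di, dj
def pvDi : List Int := [-1, 0, 1, 0]
def pvDj : List Int := [0, 1, 0, -1]

-- tuple comparison (c, i, j) < (c', i', j') — Python's lexicographic order on the heap entries
def pvLt3 (a b : Int × Int × Int) : Bool :=
  decide (a.1 < b.1) || (a.1 == b.1 && (decide (a.2.1 < b.2.1) || (a.2.1 == b.2.1 && decide (a.2.2 < b.2.2))))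

-- heapq modelled by its contract: the heap is the list of its entries, heappop removes and
-- returns the least entry in tuple order (exact: equal triples are indistinguishable, so which
-- physical copy is removed cannot be observed).  pvHeapMin h t = least entry of h :: t.
def pvHeapMin (h : Int × Int × Int) (t : List (Int × Int × Int)) : Int × Int × Int :=
  t.foldl (fun m x => if pvLt3 x m then x else m) h

-- visited[i][j]; reads outside the allocated grid answer True — never reached under Pre_
-- (pushed coordinates are bounds-checked, the start cell exists since land ≠ []); the default
-- only totalises the function so that the loop measure decreases.
def pvVGet (v : List (List Bool)) (i j : Int) : Bool :=
  if 0 ≤ i ∧ 0 ≤ j then ((v.getD i.toNat []).getD j.toNat true) else true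

-- visited[i][j] = True (out-of-range writes are a no-op, unreachable under Pre_)
def pvVSet (v : List (List Bool)) (i j : Int) : List (List Bool) :=
  if 0 ≤ i ∧ 0 ≤ j then v.modify i.toNat (fun row => row.set j.toNat true) else v

-- land[i][j]; exact for the indices reached under Pre_ (0 ≤ i, j < len(land) ≤ len(row))
def pvLand (land : List (List Int)) (i j : Int) : Int :=
  (land.getD i.toNat []).getD j.toNat 0

-- number of False entries of visited: the termination measure of A's while loop
def pvCountFalse (v : List (List Bool)) : Nat := (v.map (fun r => r.count false)).sum

theorem pvHeapMin_mem (t : List (Int × Int × Int)) (h : Int × Int × Int) :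
    pvHeapMin h t ∈ h :: t := by
  induction t generalizing h with
  | nil => simp [pvHeapMin]
  | cons x t ih =>
    show pvHeapMin (if pvLt3 x h then x else h) t ∈ h :: x :: t
    have h1 := ih (if pvLt3 x h then x else h)
    rcases List.mem_cons.1 h1 with h2 | h2
    · rw [h2]; split <;> simp
    · simp [h2]

theorem pvCountSetTrue (r : List Bool) (b : Nat) (hb : r.getD b true = false) :
    (r.set b true).count false < r.count false := by
  induction r generalizing b with
  | nil => simp at hb
  | cons c t ih =>
    cases b with
    | zero => simp_all
    | succ b =>
      simp only [List.getD_cons_succ] at hb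
      have := ih b hb
      simp only [List.set_cons_succ, List.count_cons]
      omega

theorem pvCountFalse_vset_lt (v : List (List Bool)) (i j : Int)
    (h : pvVGet v i j = false) : pvCountFalse (pvVSet v i j) < pvCountFalse v := by
  unfold pvVGet at h
  split at h
  case isFalse => simp at h
  case isTrue hij =>
    unfold pvVSet
    rw [if_pos hij]
    generalize i.toNat = a at h ⊢
    generalize j.toNat = b at h ⊢
    induction v generalizing a with
    | nil => simp at h
    | cons r t ih =>
      cases a with
      | zero =>
        simp only [List.getD_cons_zero] at h
        have := pvCountSetTrue r b h
        simp only [List.modify_zero_cons, pvCountFalse, List.map_cons, List.sum_cons]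
        omega
      | succ a =>
        simp only [List.getD_cons_succ] at h
        have := ih a h
        simp only [List.modify_succ_cons, pvCountFalse, List.map_cons, List.sum_cons] at this ⊢
        omega

def pvLoopA (land : List (List Int)) (height n : Int) :
    List (List Bool) → List (Int × Int × Int) → Int → Int
  | _, [], total => total
  | visited, h :: t, total =>
    let m := pvHeapMin h t
    let rest := (h :: t).erase m
    if pvVGet visited m.2.1 m.2.2 then
      pvLoopA land height n visited rest total
    else
      let visited' := pvVSet visited m.2.1 m.2.2
      let heap' := (PySem.List.pyRange 0 4 1).foldl (fun hp d =>
        let ni := m.2.1 + PySem.List.pyGetD pvDi d 0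
        let nj := m.2.2 + PySem.List.pyGetD pvDj d 0
        if 0 ≤ ni ∧ ni < n ∧ 0 ≤ nj ∧ nj < n then
          (let tem := |pvLand land m.2.1 m.2.2 - pvLand land ni nj|
           if tem ≤ height then ((0 : Int), ni, nj) else (tem, ni, nj)) :: hp
        else hp) rest
      pvLoopA land height n visited' heap' (total + m.1)
  termination_by visited heap _ => (pvCountFalse visited, heap.length)
  decreasing_by
  · exact Prod.Lex.right _ (by
      have hm := pvHeapMin_mem t h
      have := List.length_erase_of_mem hm
      simp only [this, List.length_cons]; omega)
  · exact Prod.Lex.left _ _ (pvCountFalse_vset_lt _ _ _ (by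
      rename_i hnv; simpa using hnv))

def solution (land : List (List Int)) (height : Int) : Int :=
  let n : Int := land.length
  pvLoopA land height n
    (List.replicate land.length (List.replicate land.length false))
    [((0 : Int), (0 : Int), (0 : Int))] 0

-- ===== PORT B =====
-- the key lambda kv ↦ (kv[1], kv[0]): Python's tuple '<' = lexicographic on (cost, i, j)
def pvKeyLt (p q : (Int × Int) × Int) : Bool :=
  decide (p.2 < q.2) || (p.2 == q.2 && (decide (p.1.1 < q.1.1) || (p.1.1 == q.1.1 && decide (p.1.2 < q.1.2))))

-- min(best.items(), key=…): hand port of min with a key — the FIRST item with minimal key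
-- (exact; here minimal keys are even unique since dict keys are distinct)
def pvMinItem (h : (Int × Int) × Int) (t : List ((Int × Int) × Int)) : (Int × Int) × Int :=
  t.foldl (fun m kv => if pvKeyLt kv m then kv else m) h

def pvLoopB (land : List (List Int)) (height n : Int) :
    Nat → PySem.Set (Int × Int) → PySem.Dict (Int × Int) Int → Int → Int
  | 0, _, _, total => total
  | Nat.succ k, visited, best, total =>
    match best.items with
    | [] => total
    | kv :: rest =>
      let m := pvMinItem kv rest
      let best1 := best.erase m.1
      let visited1 := PySem.Set.add visited m.1
      let best2 := [(m.1.1 - 1, m.1.2), (m.1.1, m.1.2 + 1), (m.1.1 + 1, m.1.2), (m.1.1, m.1.2 - 1)].foldl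
        (fun b u =>
          if 0 ≤ u.1 ∧ u.1 < n ∧ 0 ≤ u.2 ∧ u.2 < n ∧ ¬ u ∈ visited1 then
            let d := |pvLand land m.1.1 m.1.2 - pvLand land u.1 u.2|
            let nc : Int := if d ≤ height then 0 else d
            if b.contains u = false || decide (nc < b.getD u 0) then b.insert u nc else b
          else b) best1
      pvLoopB land height n k visited1 best2 (total + m.2)

def solution_alt (land : List (List Int)) (height : Int) : Int :=
  let n : Int := land.length
  pvLoopB land height n (n * n).toNat PySem.Set.empty
    (PySem.Dict.empty.insert ((0 : Int), (0 : Int)) 0) 0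

-- ===== PRECONDITION & SPEC =====
-- Pre_ = exactly where Python A returns: an empty grid raises IndexError (visited[0][0] on the
-- initial pop), and for n = len(land) ≥ 2 a row shorter than n raises IndexError when its missing
-- cell is read (every cell is reached: the grid graph is connected); for n = 1 no neighbour is in
-- bounds, land is never indexed, and A returns 0 whatever the single row holds.
def Pre_solution (land : List (List Int)) (height : Int) : Prop :=
  land ≠ [] ∧ (land.length = 1 ∨ ∀ row ∈ land, land.length ≤ row.length)
instance (land : List (List Int)) (height : Int) : Decidable (Pre_solution land height) := by
  unfold Pre_solution; infer_instance

def pvWitness_solution : List (List Int) × Int := ([[1, 4], [2, 8]], 3)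

def Spec_solution (land : List (List Int)) (height : Int) (out : Int) : Prop := out = solution_alt land height
instance (land : List (List Int)) (height : Int) (out : Int) : Decidable (Spec_solution land height out) := by unfold Spec_solution; infer_instance

-- ===== CLAIM (what is proved, stated in full; the proofs are below) =====
def Claim_equal_solution : Prop := ∀ (land : List (List Int)) (height : Int), Dom_solution land height → Pre_solution land height → Spec_solution land height (solution land height)

-- ===== LEMMAS AND PROOFS =====

-- the simulation invariant between A's state (visited grid, heap multiset) and B's state
-- (visited set, frontier dict): per unvisited cell, the dict holds the least heap offer.
def pvInv (land : List (List Int)) (visited : List (List Bool)) (heap : List (Int × Int × Int))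
    (vs : PySem.Set (Int × Int)) (best : PySem.Dict (Int × Int) Int) : Prop :=
  (visited.length = land.length ∧ ∀ row ∈ visited, row.length = land.length) ∧
  (∀ i j : Int, 0 ≤ i → i < (land.length : Int) → 0 ≤ j → j < (land.length : Int) →
    ((i, j) ∈ vs ↔ pvVGet visited i j = true)) ∧
  best.keys.Nodup ∧
  (∀ v c, best.get? v = some c → pvVGet visited v.1 v.2 = false) ∧
  (∀ c i j, (c, i, j) ∈ heap → pvVGet visited i j = false →
    ∃ c', best.get? (i, j) = some c' ∧ c' ≤ c) ∧
  (∀ v c, best.get? v = some c → (c, v.1, v.2) ∈ heap)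

-- ---- order facts for the lexicographic entry order ----
theorem pvLt3_irrefl (a : Int × Int × Int) : pvLt3 a a = false := by
  obtain ⟨a1, a2, a3⟩ := a; simp [pvLt3]

theorem pvLt3_asymm {a b : Int × Int × Int} (h : pvLt3 a b = true) : pvLt3 b a = false := by
  obtain ⟨a1, a2, a3⟩ := a; obtain ⟨b1, b2, b3⟩ := b
  simp [pvLt3] at h ⊢; omega

theorem pvLt3_trans_neg {a b c : Int × Int × Int} (h1 : pvLt3 b a = false)
    (h2 : pvLt3 c b = false) : pvLt3 c a = false := by
  obtain ⟨a1, a2, a3⟩ := a; obtain ⟨b1, b2, b3⟩ := b; obtain ⟨c1, c2, c3⟩ := c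
  simp [pvLt3] at h1 h2 ⊢; omega

theorem pvLt3_of_ne {a b : Int × Int × Int} (hne : a ≠ b) (h : pvLt3 a b = false) :
    pvLt3 b a = true := by
  obtain ⟨a1, a2, a3⟩ := a; obtain ⟨b1, b2, b3⟩ := b
  simp [pvLt3] at h ⊢
  have hne' : ¬(a1 = b1 ∧ a2 = b2 ∧ a3 = b3) := by simpa [Prod.ext_iff] using hne
  omega

theorem pvLt3_same_vertex {c c' i j : Int} (h : pvLt3 (c', i, j) (c, i, j) = false) : c ≤ c' := by
  simp [pvLt3] at h; omega

theorem pvKeyLt_eq (p q : (Int × Int) × Int) :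
    pvKeyLt p q = pvLt3 (p.2, p.1.1, p.1.2) (q.2, q.1.1, q.1.2) := rfl

theorem pvHeapMin_min (t : List (Int × Int × Int)) (h : Int × Int × Int) :
    ∀ x ∈ h :: t, pvLt3 x (pvHeapMin h t) = false := by
  induction t generalizing h with
  | nil =>
    intro x hx; simp at hx; subst hx; exact pvLt3_irrefl _
  | cons y t ih =>
    intro x hx
    have step : pvHeapMin h (y :: t) = pvHeapMin (if pvLt3 y h then y else h) t := rfl
    have hyacc : pvLt3 y (if pvLt3 y h then y else h) = false := by
      by_cases hb : pvLt3 y h <;> simp [hb, pvLt3_irrefl]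
    have hhacc : pvLt3 h (if pvLt3 y h then y else h) = false := by
      by_cases hb : pvLt3 y h
      · simpa [hb] using pvLt3_asymm hb
      · simp [hb, pvLt3_irrefl]
    have haccmin := ih (if pvLt3 y h then y else h) _ (List.mem_cons_self ..)
    rw [step]
    rcases List.mem_cons.1 hx with rfl | hx
    · exact pvLt3_trans_neg haccmin hhacc
    rcases List.mem_cons.1 hx with rfl | hx
    · exact pvLt3_trans_neg haccmin hyacc
    · exact ih _ _ (List.mem_cons_of_mem _ hx)

theorem pvKeyLt_asymm {p q : (Int × Int) × Int} (h : pvKeyLt p q = true) :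
    pvKeyLt q p = false := by
  rw [pvKeyLt_eq] at h ⊢; exact pvLt3_asymm h

theorem pvMinItem_eq (x : (Int × Int) × Int) :
    ∀ (t : List ((Int × Int) × Int)) (acc), (acc = x ∨ pvKeyLt x acc = true) →
      (∀ y ∈ t, y = x ∨ pvKeyLt x y = true) → (x = acc ∨ x ∈ t) → pvMinItem acc t = x := by
  intro t
  induction t with
  | nil =>
    intro acc hacc _ hx
    rcases hx with rfl | hx
    · rfl
    · simp at hx
  | cons y t ih =>
    intro acc hacc hall hx
    have step : pvMinItem acc (y :: t) = pvMinItem (if pvKeyLt y acc then y else acc) t := rfl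
    rw [step]
    have hy := hall y (List.mem_cons_self ..)
    have hall' : ∀ z ∈ t, z = x ∨ pvKeyLt x z = true :=
      fun z hz => hall z (List.mem_cons_of_mem _ hz)
    have hacc' : (if pvKeyLt y acc then y else acc) = x ∨
        pvKeyLt x (if pvKeyLt y acc then y else acc) = true := by
      by_cases hb : pvKeyLt y acc
      · rw [if_pos hb]; exact hy
      · rw [if_neg hb]; exact hacc
    have hx' : x = (if pvKeyLt y acc then y else acc) ∨ x ∈ t := by
      by_cases hb : pvKeyLt y acc
      · rw [if_pos hb]
        rcases hx with rfl | hx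
        · rcases hy with rfl | hy
          · exact Or.inl rfl
          · rw [pvKeyLt_asymm hy] at hb; simp at hb
        · rcases List.mem_cons.1 hx with rfl | hx
          · exact Or.inl rfl
          · exact Or.inr hx
      · rw [if_neg hb]
        rcases hx with rfl | hx
        · exact Or.inl rfl
        · rcases List.mem_cons.1 hx with rfl | hx
          · rcases hacc with rfl | hacc
            · exact Or.inl rfl
            · exact absurd hacc hb
          · exact Or.inr hx
    exact ih _ hacc' hall' hx'

-- ---- visited-grid lemmas ----
theorem pvVGet_false {v : List (List Bool)} {i j : Int} (h : pvVGet v i j = false) :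
    0 ≤ i ∧ 0 ≤ j ∧ i.toNat < v.length ∧ j.toNat < (v.getD i.toNat []).length ∧
      (v.getD i.toNat []).getD j.toNat true = false := by
  unfold pvVGet at h
  split at h
  case isFalse => simp at h
  case isTrue hij =>
    refine ⟨hij.1, hij.2, ?_, ?_, h⟩
    · by_contra hlen
      rw [show v.getD i.toNat [] = [] from List.getD_eq_default _ _ (by omega)] at h
      simp at h
    · by_contra hlen
      rw [List.getD_eq_default _ _ (by omega)] at h
      simp at h

theorem pvRowGetD_set_ne {r : List Bool} {b b' : Nat} (h : b' ≠ b) :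
    (r.set b true).getD b' true = r.getD b' true := by
  rw [List.getD_eq_getElem?_getD, List.getD_eq_getElem?_getD, List.getElem?_set_ne (by omega)]

theorem pvVGet_vset_self {v : List (List Bool)} {i j : Int} (hi : 0 ≤ i) (hj : 0 ≤ j) :
    pvVGet (pvVSet v i j) i j = true := by
  unfold pvVGet pvVSet
  rw [if_pos ⟨hi, hj⟩, if_pos ⟨hi, hj⟩]
  by_cases hlen : i.toNat < v.length
  · have h1 : (v.modify i.toNat fun row => row.set j.toNat true).getD i.toNat []
        = (v[i.toNat]).set j.toNat true := by
      rw [List.getD_eq_getElem?_getD, List.getElem?_modify, List.getElem?_eq_getElem hlen]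
      simp
    rw [h1]
    by_cases hrow : j.toNat < (v[i.toNat]).length
    · rw [List.getD_eq_getElem?_getD, List.getElem?_set_self (by simpa using hrow)]
      rfl
    · rw [List.getD_eq_default _ _ (by simp; omega)]
  · have h1 : (v.modify i.toNat fun row => row.set j.toNat true).getD i.toNat [] = [] :=
      List.getD_eq_default _ _ (by simp [List.length_modify]; omega)
    rw [h1]
    rfl

theorem pvVGet_vset_ne {v : List (List Bool)} {i j i' j' : Int}
    (hne : ¬(i' = i ∧ j' = j)) : pvVGet (pvVSet v i j) i' j' = pvVGet v i' j' := by
  unfold pvVGet pvVSet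
  by_cases hij : 0 ≤ i ∧ 0 ≤ j
  swap
  · rw [if_neg hij]
  rw [if_pos hij]
  by_cases hij' : 0 ≤ i' ∧ 0 ≤ j'
  swap
  · rw [if_neg hij', if_neg hij']
  rw [if_pos hij', if_pos hij']
  by_cases hii : i'.toNat = i.toNat
  · have hjj : j'.toNat ≠ j.toNat := by
      by_cases hieq : i' = i
      · subst hieq
        have : j' ≠ j := fun hc => hne ⟨rfl, hc⟩
        omega
      · omega
    by_cases hlen : i.toNat < v.length
    · have h1 : (v.modify i.toNat fun row => row.set j.toNat true).getD i'.toNat []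
          = (v[i.toNat]).set j.toNat true := by
        rw [hii, List.getD_eq_getElem?_getD, List.getElem?_modify, List.getElem?_eq_getElem hlen]
        simp
      have h2 : v.getD i'.toNat [] = v[i.toNat] := by
        rw [hii, List.getD_eq_getElem?_getD, List.getElem?_eq_getElem hlen]
        rfl
      rw [h1, h2, pvRowGetD_set_ne hjj]
    · have h1 : (v.modify i.toNat fun row => row.set j.toNat true).getD i'.toNat [] = [] :=
        List.getD_eq_default _ _ (by simp [List.length_modify]; omega)
      have h2 : v.getD i'.toNat [] = [] := List.getD_eq_default _ _ (by omega)
      rw [h1, h2]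
  · have h1 : (v.modify i.toNat fun row => row.set j.toNat true).getD i'.toNat []
        = v.getD i'.toNat [] := by
      rw [List.getD_eq_getElem?_getD, List.getElem?_modify, List.getD_eq_getElem?_getD]
      cases hvi : v[i'.toNat]? with
      | none => rfl
      | some r => simp [if_neg (by omega : ¬ i.toNat = i'.toNat)]
    rw [h1]

theorem pvVSet_length (v : List (List Bool)) (i j : Int) :
    (pvVSet v i j).length = v.length := by
  unfold pvVSet; split <;> simp

theorem pvVSet_rows {v : List (List Bool)} {L : Nat} (hrows : ∀ row ∈ v, row.length = L)
    (i j : Int) : ∀ row ∈ pvVSet v i j, row.length = L := by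
  unfold pvVSet
  split
  · intro row hrow
    rw [List.mem_iff_getElem] at hrow
    obtain ⟨a, ha, hrow⟩ := hrow
    rw [List.getElem_modify] at hrow
    split at hrow
    · subst hrow
      simp only [List.length_set]
      exact hrows _ (List.getElem_mem (by simpa using ha))
    · subst hrow
      exact hrows _ (List.getElem_mem (by simpa using ha))
  · exact hrows

theorem pvCountFalse_replicate (n : Nat) :
    pvCountFalse (List.replicate n (List.replicate n false)) = n * n := by
  unfold pvCountFalse
  rw [List.map_replicate, List.sum_replicate, List.count_replicate]
  simp

theorem pvVGet_replicate {n : Nat} {i j : Int} (hi : 0 ≤ i) (hin : i < (n : Int))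
    (hj : 0 ≤ j) (hjn : j < (n : Int)) :
    pvVGet (List.replicate n (List.replicate n false)) i j = false := by
  unfold pvVGet
  rw [if_pos ⟨hi, hj⟩]
  rw [List.getD_eq_getElem?_getD, List.getD_eq_getElem?_getD, List.getElem?_replicate,
    if_pos (by omega)]
  simp only [Option.getD_some]
  rw [List.getElem?_replicate, if_pos (by omega)]
  simp

-- ---- dict-erase lemmas (PySem.Dict has no erase lemmas; erase is items.filter) ----
theorem pvGet?_erase_self {ν : Type} (d : PySem.Dict (Int × Int) ν) (k : Int × Int) :
    (d.erase k).get? k = none := by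
  simp only [PySem.Dict.erase, PySem.Dict.get?, Option.map_eq_none_iff]
  rw [List.find?_eq_none]
  intro p hp
  have := (List.mem_filter.1 hp).2
  simpa using this

theorem pvGet?_erase_ne {ν : Type} (d : PySem.Dict (Int × Int) ν) {k k' : Int × Int}
    (h : k' ≠ k) : (d.erase k).get? k' = d.get? k' := by
  simp only [PySem.Dict.erase, PySem.Dict.get?]
  congr 1
  induction d.items with
  | nil => rfl
  | cons p t ih =>
    by_cases hpk : p.1 = k
    · rw [List.filter_cons_of_neg (by simp [hpk]), List.find?_cons_of_neg (by simp [hpk]; exact fun hc => h hc.symm), ih]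
    · by_cases hpk' : p.1 = k'
      · rw [List.filter_cons_of_pos (by simp [hpk]), List.find?_cons_of_pos (by simp [hpk']),
          List.find?_cons_of_pos (by simp [hpk'])]
      · rw [List.filter_cons_of_pos (by simp [hpk]), List.find?_cons_of_neg (by simp [hpk']),
          List.find?_cons_of_neg (by simp [hpk']), ih]

theorem pvNodup_erase {ν : Type} (d : PySem.Dict (Int × Int) ν) (k : Int × Int)
    (h : d.keys.Nodup) : (d.erase k).keys.Nodup := by
  simp only [PySem.Dict.erase, PySem.Dict.keys] at *
  exact List.Nodup.sublist (List.Sublist.map _ (List.filter_sublist)) h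

theorem pvLoopB_items_nil (land : List (List Int)) (height n : Int) (k : Nat)
    (vs : PySem.Set (Int × Int)) (best : PySem.Dict (Int × Int) Int) (total : Int)
    (h : best.items = []) : pvLoopB land height n k vs best total = total := by
  cases k with
  | zero => rfl
  | succ k => rw [pvLoopB, h]

-- ---- the per-neighbour step of each loop, as a named function (proof bookkeeping only) ----
def pvStepA (land : List (List Int)) (height n si sj : Int)
    (hp : List (Int × Int × Int)) (u : Int × Int) : List (Int × Int × Int) :=
  if 0 ≤ u.1 ∧ u.1 < n ∧ 0 ≤ u.2 ∧ u.2 < n then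
    (let tem := |pvLand land si sj - pvLand land u.1 u.2|
     if tem ≤ height then ((0 : Int), u.1, u.2) else (tem, u.1, u.2)) :: hp
  else hp

def pvStepB (land : List (List Int)) (height n si sj : Int) (vs1 : PySem.Set (Int × Int))
    (b : PySem.Dict (Int × Int) Int) (u : Int × Int) : PySem.Dict (Int × Int) Int :=
  if 0 ≤ u.1 ∧ u.1 < n ∧ 0 ≤ u.2 ∧ u.2 < n ∧ ¬ u ∈ vs1 then
    let d := |pvLand land si sj - pvLand land u.1 u.2|
    let nc : Int := if d ≤ height then 0 else d
    if b.contains u = false || decide (nc < b.getD u 0) then b.insert u nc else b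
  else b

theorem pvInv_skip {land : List (List Int)} {visited : List (List Bool)}
    {heap : List (Int × Int × Int)} {vs : PySem.Set (Int × Int)}
    {best : PySem.Dict (Int × Int) Int} {m : Int × Int × Int}
    (hinv : pvInv land visited heap vs best)
    (hv : pvVGet visited m.2.1 m.2.2 = true) :
    pvInv land visited (heap.erase m) vs best := by
  obtain ⟨h1, h2, h3, h4, h5, h6⟩ := hinv
  refine ⟨h1, h2, h3, h4, ?_, ?_⟩
  · intro c i j hcij hvg
    exact h5 c i j (List.mem_of_mem_erase hcij) hvg
  · intro v c hvc
    have hmem := h6 v c hvc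
    have hne : (c, v.1, v.2) ≠ m := by
      intro hc
      have hv' := h4 v c hvc
      rw [← hc] at hv
      simp only at hv
      rw [hv'] at hv; exact Bool.false_ne_true hv
    exact (List.mem_erase_of_ne hne).2 hmem

theorem pvInv_pop {land : List (List Int)} {visited : List (List Bool)}
    {heap : List (Int × Int × Int)} {vs : PySem.Set (Int × Int)}
    {best : PySem.Dict (Int × Int) Int} {m : Int × Int × Int}
    (hinv : pvInv land visited heap vs best)
    (hv : pvVGet visited m.2.1 m.2.2 = false) :
    pvInv land (pvVSet visited m.2.1 m.2.2) (heap.erase m)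
      (PySem.Set.add vs m.2) (best.erase m.2) := by
  obtain ⟨h1, h2, h3, h4, h5, h6⟩ := hinv
  have hb := pvVGet_false hv
  refine ⟨⟨by rw [pvVSet_length]; exact h1.1, pvVSet_rows h1.2 _ _⟩, ?_, pvNodup_erase _ _ h3, ?_, ?_, ?_⟩
  · intro i j hi hin hj hjn
    by_cases hm : i = m.2.1 ∧ j = m.2.2
    · rw [hm.1, hm.2, pvVGet_vset_self hb.1 hb.2.1]
      constructor
      · intro _; rfl
      · intro _
        rw [PySem.Set.mem_add]
        exact Or.inr rfl
    · rw [pvVGet_vset_ne hm, PySem.Set.mem_add]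
      constructor
      · rintro (hmem | heq)
        · exact (h2 i j hi hin hj hjn).1 hmem
        · exfalso; apply hm
          constructor
          · rw [show i = ((i, j) : Int × Int).1 from rfl, heq]
          · rw [show j = ((i, j) : Int × Int).2 from rfl, heq]
      · intro hvg; exact Or.inl ((h2 i j hi hin hj hjn).2 hvg)
  · intro v c hvc
    have hne : v ≠ m.2 := by
      intro hc; rw [hc, pvGet?_erase_self] at hvc; simp at hvc
    rw [pvGet?_erase_ne _ hne] at hvc
    have := h4 v c hvc
    rw [pvVGet_vset_ne (by
      intro hc; exact hne (Prod.ext hc.1 hc.2))]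
    exact this
  · intro c i j hcij hvg
    have hne : ¬(i = m.2.1 ∧ j = m.2.2) := by
      intro hc
      rw [hc.1, hc.2, pvVGet_vset_self hb.1 hb.2.1] at hvg
      simp at hvg
    rw [pvVGet_vset_ne hne] at hvg
    obtain ⟨c', hc', hle⟩ := h5 c i j (List.mem_of_mem_erase hcij) hvg
    refine ⟨c', ?_, hle⟩
    rw [pvGet?_erase_ne _ (by intro hc; exact hne ⟨congrArg Prod.fst hc, congrArg Prod.snd hc⟩)]
    exact hc'
  · intro v c hvc
    have hne : v ≠ m.2 := by
      intro hc; rw [hc, pvGet?_erase_self] at hvc; simp at hvc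
    rw [pvGet?_erase_ne _ hne] at hvc
    have hmem := h6 v c hvc
    have hne' : (c, v.1, v.2) ≠ m := by
      intro hc
      apply hne
      have : (c, v.1, v.2).2 = m.2 := by rw [hc]
      simpa using this
    exact (List.mem_erase_of_ne hne').2 hmem

theorem pvInv_step {land : List (List Int)} (height si sj : Int)
    {visited : List (List Bool)} {heap : List (Int × Int × Int)}
    {vs : PySem.Set (Int × Int)} {best : PySem.Dict (Int × Int) Int} (u : Int × Int)
    (hinv : pvInv land visited heap vs best) :
    pvInv land visited (pvStepA land height (land.length : Int) si sj heap u) vs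
      (pvStepB land height (land.length : Int) si sj vs best u) := by
  obtain ⟨h1, h2, h3, h4, h5, h6⟩ := hinv
  unfold pvStepA pvStepB
  by_cases hbnd : 0 ≤ u.1 ∧ u.1 < (land.length : Int) ∧ 0 ≤ u.2 ∧ u.2 < (land.length : Int)
  case neg =>
    rw [if_neg hbnd, if_neg (by tauto)]
    exact ⟨h1, h2, h3, h4, h5, h6⟩
  case pos =>
  rw [if_pos hbnd]
  have hpush : (if |pvLand land si sj - pvLand land u.1 u.2| ≤ height
        then ((0 : Int), u.1, u.2)
        else (|pvLand land si sj - pvLand land u.1 u.2|, u.1, u.2))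
      = ((if |pvLand land si sj - pvLand land u.1 u.2| ≤ height then (0 : Int)
          else |pvLand land si sj - pvLand land u.1 u.2|), u.1, u.2) := by
    split <;> rfl
  rw [hpush]
  set nc : Int := if |pvLand land si sj - pvLand land u.1 u.2| ≤ height then (0 : Int)
      else |pvLand land si sj - pvLand land u.1 u.2| with hnc
  have hiff := h2 u.1 u.2 hbnd.1 hbnd.2.1 hbnd.2.2.1 hbnd.2.2.2
  rw [Prod.mk.eta] at hiff
  by_cases hvm : u ∈ vs
  · -- visited neighbour: A pushes a stale entry, B skips
    rw [if_neg (by tauto)]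
    have hu : pvVGet visited u.1 u.2 = true := hiff.1 hvm
    refine ⟨h1, h2, h3, h4, ?_, ?_⟩
    · intro c i j hcij hvg
      rcases List.mem_cons.1 hcij with heq | hcij
      · exfalso
        have hi : i = u.1 := congrArg (fun p => p.2.1) heq
        have hj : j = u.2 := congrArg (fun p => p.2.2) heq
        rw [hi, hj, hu] at hvg
        simp at hvg
      · exact h5 c i j hcij hvg
    · intro v c hvc
      exact List.mem_cons_of_mem _ (h6 v c hvc)
  · -- unvisited neighbour
    rw [if_pos ⟨hbnd.1, hbnd.2.1, hbnd.2.2.1, hbnd.2.2.2, hvm⟩]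
    have hu : pvVGet visited u.1 u.2 = false := by
      cases hval : pvVGet visited u.1 u.2
      · rfl
      · exact absurd (hiff.2 hval) hvm
    by_cases hcont : best.contains u = false
    · -- fresh key: B inserts
      have hnone : best.get? u = none := (PySem.Dict.get?_eq_none_iff_contains best u).2 hcont
      rw [if_pos (by rw [hcont]; simp)]
      refine ⟨h1, h2, PySem.Dict.nodup_keys_insert _ _ _ h3, ?_, ?_, ?_⟩
      · intro v c hvc
        rw [PySem.Dict.get?_insert] at hvc
        split at hvc
        · rename_i hvu; rw [hvu]; exact hu
        · exact h4 v c hvc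
      · intro c i j hcij hvg
        rcases List.mem_cons.1 hcij with heq | hcij
        · have hc : c = nc := congrArg (fun p => p.1) heq
          have hi : i = u.1 := congrArg (fun p => p.2.1) heq
          have hj : j = u.2 := congrArg (fun p => p.2.2) heq
          refine ⟨nc, ?_, by rw [hc]⟩
          rw [hi, hj, Prod.mk.eta, PySem.Dict.get?_insert_self]
        · by_cases hij : ((i, j) : Int × Int) = u
          · obtain ⟨c', hc', _⟩ := h5 c i j hcij hvg
            rw [hij, hnone] at hc'
            simp at hc'
          · obtain ⟨c', hc', hle⟩ := h5 c i j hcij hvg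
            refine ⟨c', ?_, hle⟩
            rw [PySem.Dict.get?_insert, if_neg hij]
            exact hc'
      · intro v c hvc
        rw [PySem.Dict.get?_insert] at hvc
        split at hvc
        · rename_i hvu
          have hc : c = nc := by injection hvc with h; exact h.symm
          rw [hvu, hc]
          exact List.mem_cons_self ..
        · exact List.mem_cons_of_mem _ (h6 v c hvc)
    · -- key present with value c0
      have hc0ex : ∃ c0, best.get? u = some c0 := by
        cases hg : best.get? u with
        | none => exact absurd ((PySem.Dict.get?_eq_none_iff_contains best u).1 hg) hcont
        | some c0 => exact ⟨c0, rfl⟩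
      obtain ⟨c0, hc0⟩ := hc0ex
      have hgetD : best.getD u 0 = c0 := PySem.Dict.getD_of_get?_eq_some _ _ hc0
      by_cases hlt : nc < c0
      · -- strictly better offer: B overwrites
        rw [if_pos (by rw [hgetD]; simp [← hnc]; exact Or.inr hlt)]
        refine ⟨h1, h2, PySem.Dict.nodup_keys_insert _ _ _ h3, ?_, ?_, ?_⟩
        · intro v c hvc
          rw [PySem.Dict.get?_insert] at hvc
          split at hvc
          · rename_i hvu; rw [hvu]; exact hu
          · exact h4 v c hvc
        · intro c i j hcij hvg
          rcases List.mem_cons.1 hcij with heq | hcij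
          · have hc : c = nc := congrArg (fun p => p.1) heq
            have hi : i = u.1 := congrArg (fun p => p.2.1) heq
            have hj : j = u.2 := congrArg (fun p => p.2.2) heq
            refine ⟨nc, ?_, by rw [hc]⟩
            rw [hi, hj, Prod.mk.eta, PySem.Dict.get?_insert_self]
          · by_cases hij : ((i, j) : Int × Int) = u
            · obtain ⟨c', hc', hle⟩ := h5 c i j hcij hvg
              rw [hij, hc0] at hc'
              have hc'c0 : c' = c0 := by injection hc' with h; exact h.symm
              refine ⟨nc, ?_, by omega⟩
              rw [hij, PySem.Dict.get?_insert_self]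
            · obtain ⟨c', hc', hle⟩ := h5 c i j hcij hvg
              refine ⟨c', ?_, hle⟩
              rw [PySem.Dict.get?_insert, if_neg hij]
              exact hc'
        · intro v c hvc
          rw [PySem.Dict.get?_insert] at hvc
          split at hvc
          · rename_i hvu
            have hc : c = nc := by injection hvc with h; exact h.symm
            rw [hvu, hc]
            exact List.mem_cons_self ..
          · exact List.mem_cons_of_mem _ (h6 v c hvc)
      · -- no better: B keeps its dict
        rw [if_neg (by
          rw [hgetD]
          simp only [Bool.or_eq_true, decide_eq_true_eq, ← hnc]
          rintro (hc | hc)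
          · exact hcont hc
          · exact hlt hc)]
        refine ⟨h1, h2, h3, h4, ?_, ?_⟩
        · intro c i j hcij hvg
          rcases List.mem_cons.1 hcij with heq | hcij
          · have hc : c = nc := congrArg (fun p => p.1) heq
            have hi : i = u.1 := congrArg (fun p => p.2.1) heq
            have hj : j = u.2 := congrArg (fun p => p.2.2) heq
            refine ⟨c0, ?_, by omega⟩
            rw [hi, hj, Prod.mk.eta]
            exact hc0
          · exact h5 c i j hcij hvg
        · intro v c hvc
          exact List.mem_cons_of_mem _ (h6 v c hvc)

theorem pvInv_foldl {land : List (List Int)} (height si sj : Int)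
    {visited : List (List Bool)} {heap : List (Int × Int × Int)}
    {vs : PySem.Set (Int × Int)} {best : PySem.Dict (Int × Int) Int}
    (us : List (Int × Int)) (hinv : pvInv land visited heap vs best) :
    pvInv land visited (us.foldl (pvStepA land height (land.length : Int) si sj) heap) vs
      (us.foldl (pvStepB land height (land.length : Int) si sj vs) best) := by
  induction us generalizing heap best with
  | nil => exact hinv
  | cons u us ih => exact ih (pvInv_step height si sj u hinv)

theorem pvFoldA_unroll (land : List (List Int)) (height n si sj : Int)
    (rest : List (Int × Int × Int)) :
    (PySem.List.pyRange 0 4 1).foldl (fun hp d =>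
      let ni := si + PySem.List.pyGetD pvDi d 0
      let nj := sj + PySem.List.pyGetD pvDj d 0
      if 0 ≤ ni ∧ ni < n ∧ 0 ≤ nj ∧ nj < n then
        (let tem := |pvLand land si sj - pvLand land ni nj|
         if tem ≤ height then ((0 : Int), ni, nj) else (tem, ni, nj)) :: hp
      else hp) rest
    = [(si - 1, sj), (si, sj + 1), (si + 1, sj), (si, sj - 1)].foldl
        (pvStepA land height n si sj) rest := by
  have hr : PySem.List.pyRange 0 4 1 = [0, 1, 2, 3] := by decide
  have d0 : PySem.List.pyGetD pvDi 0 0 = -1 := by decide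
  have d1 : PySem.List.pyGetD pvDi 1 0 = 0 := by decide
  have d2 : PySem.List.pyGetD pvDi 2 0 = 1 := by decide
  have d3 : PySem.List.pyGetD pvDi 3 0 = 0 := by decide
  have e0 : PySem.List.pyGetD pvDj 0 0 = 0 := by decide
  have e1 : PySem.List.pyGetD pvDj 1 0 = 1 := by decide
  have e2 : PySem.List.pyGetD pvDj 2 0 = 0 := by decide
  have e3 : PySem.List.pyGetD pvDj 3 0 = -1 := by decide
  rw [hr]
  simp only [List.foldl, d0, d1, d2, d3, e0, e1, e2, e3, pvStepA, sub_eq_add_neg, add_zero]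

theorem pv_main (land : List (List Int)) (height : Int)
    (visited : List (List Bool)) (heap : List (Int × Int × Int))
    (vs : PySem.Set (Int × Int)) (best : PySem.Dict (Int × Int) Int) (total : Int) (k : Nat)
    (hinv : pvInv land visited heap vs best) (hk : pvCountFalse visited ≤ k) :
    pvLoopA land height (land.length : Int) visited heap total
      = pvLoopB land height (land.length : Int) k vs best total := by
  obtain ⟨h1, h2, h3, h4, h5, h6⟩ := hinv
  cases hheap : heap with
  | nil =>
    rw [hheap] at h6
    have hitems : best.items = [] := by
      cases hit : best.items with
      | nil => rfl
      | cons kv rest =>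
        exfalso
        have hkv : kv ∈ best.items := by rw [hit]; exact List.mem_cons_self ..
        have hget : best.get? kv.1 = some kv.2 :=
          PySem.Dict.get?_of_mem_items best (by rw [Prod.mk.eta]; exact hkv) h3
        have := h6 _ _ hget
        simp at this
    rw [pvLoopA, pvLoopB_items_nil _ _ _ _ _ _ _ hitems]
  | cons h t =>
    rw [hheap] at h5 h6
    have hmem : pvHeapMin h t ∈ h :: t := pvHeapMin_mem t h
    have hminall := pvHeapMin_min t h
    by_cases hv : pvVGet visited (pvHeapMin h t).2.1 (pvHeapMin h t).2.2
    · -- stale entry: A pops and skips, B's state is untouched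
      rw [pvLoopA, if_pos hv]
      exact pv_main land height visited ((h :: t).erase (pvHeapMin h t)) vs best total k
        (pvInv_skip ⟨h1, h2, h3, h4, h5, h6⟩ hv) hk
    · -- accepted entry
      have hvf : pvVGet visited (pvHeapMin h t).2.1 (pvHeapMin h t).2.2 = false := by
        cases hval : pvVGet visited (pvHeapMin h t).2.1 (pvHeapMin h t).2.2
        · rfl
        · exact absurd hval hv
      obtain ⟨c', hc', hlec⟩ := h5 (pvHeapMin h t).1 (pvHeapMin h t).2.1 (pvHeapMin h t).2.2
        (by simpa using hmem) hvf
      have hcm : (c', (pvHeapMin h t).2.1, (pvHeapMin h t).2.2) ∈ h :: t := h6 _ _ hc'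
      have hmle : (pvHeapMin h t).1 ≤ c' := pvLt3_same_vertex (hminall _ hcm)
      have hceq : c' = (pvHeapMin h t).1 := le_antisymm hlec hmle
      have hsome : best.get? (pvHeapMin h t).2 = some (pvHeapMin h t).1 := by
        rw [← hceq]; exact hc'
      have hx : ((pvHeapMin h t).2, (pvHeapMin h t).1) ∈ best.items :=
        PySem.Dict.mem_items_of_get?_eq_some best hsome
      have hpos : 0 < pvCountFalse visited := by
        have := pvCountFalse_vset_lt visited (pvHeapMin h t).2.1 (pvHeapMin h t).2.2 hvf
        omega
      cases hit : best.items with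
      | nil => rw [hit] at hx; simp at hx
      | cons kv rest =>
        cases k with
        | zero => omega
        | succ k' =>
          have hallmin : ∀ y ∈ best.items,
              y = ((pvHeapMin h t).2, (pvHeapMin h t).1) ∨
                pvKeyLt ((pvHeapMin h t).2, (pvHeapMin h t).1) y = true := by
            intro y hy
            have hgy : best.get? y.1 = some y.2 :=
              PySem.Dict.get?_of_mem_items best (by rw [Prod.mk.eta]; exact hy) h3
            by_cases hyv : y.1 = (pvHeapMin h t).2
            · left
              rw [hyv, hsome] at hgy
              have h2y : (pvHeapMin h t).1 = y.2 := by injection hgy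
              rw [← hyv, h2y]
            · right
              have hmemy := h6 _ _ hgy
              have hmin := hminall _ hmemy
              have hne : ((y.2, y.1.1, y.1.2) : Int × Int × Int) ≠ pvHeapMin h t := by
                intro hc
                apply hyv
                have : ((y.2, y.1.1, y.1.2) : Int × Int × Int).2 = (pvHeapMin h t).2 := by
                  rw [hc]
                simpa using this
              have := pvLt3_of_ne hne hmin
              rw [pvKeyLt_eq]
              exact this
          have hminx : pvMinItem kv rest = ((pvHeapMin h t).2, (pvHeapMin h t).1) :=
            pvMinItem_eq _ rest kv
              (hallmin kv (by rw [hit]; exact List.mem_cons_self ..))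
              (fun y hy => hallmin y (by rw [hit]; exact List.mem_cons_of_mem _ hy))
              (by rw [hit] at hx
                  rcases List.mem_cons.1 hx with hh | hh
                  · exact Or.inl hh
                  · exact Or.inr hh)
          rw [pvLoopA, if_neg hv, pvLoopB, hit]
          simp only [hminx]
          rw [pvFoldA_unroll]
          have hinv2 := pvInv_foldl height (pvHeapMin h t).2.1 (pvHeapMin h t).2.2
            [((pvHeapMin h t).2.1 - 1, (pvHeapMin h t).2.2),
             ((pvHeapMin h t).2.1, (pvHeapMin h t).2.2 + 1),
             ((pvHeapMin h t).2.1 + 1, (pvHeapMin h t).2.2),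
             ((pvHeapMin h t).2.1, (pvHeapMin h t).2.2 - 1)]
            (pvInv_pop ⟨h1, h2, h3, h4, h5, h6⟩ hvf)
          have hk' : pvCountFalse (pvVSet visited (pvHeapMin h t).2.1 (pvHeapMin h t).2.2) ≤ k' := by
            have := pvCountFalse_vset_lt visited (pvHeapMin h t).2.1 (pvHeapMin h t).2.2 hvf
            omega
          exact pv_main land height _ _ _ _ (total + (pvHeapMin h t).1) k' hinv2 hk'
  termination_by (pvCountFalse visited, heap.length)
  decreasing_by
  · exact Prod.Lex.right _ (by
      rw [hheap]
      have := List.length_erase_of_mem hmem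
      simp only [this, List.length_cons]
      omega)
  · exact Prod.Lex.left _ _ (pvCountFalse_vset_lt _ _ _ hvf)

-- ===== VERDICT (by name: the statement is the Claim_ definition above) =====
theorem solution_spec : Claim_equal_solution := by
  intro land height _ hpre
  have hL : 0 < land.length := by
    cases hland : land with
    | nil => exact absurd hland hpre.1
    | cons r ls => simp
  have hinv : pvInv land (List.replicate land.length (List.replicate land.length false))
      [((0 : Int), (0 : Int), (0 : Int))] PySem.Set.empty
      (PySem.Dict.empty.insert ((0 : Int), (0 : Int)) 0) := by
    refine ⟨⟨by simp, ?_⟩, ?_, ?_, ?_, ?_, ?_⟩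
    · intro row hrow
      rw [List.eq_of_mem_replicate hrow]
      simp
    · intro i j hi hin hj hjn
      rw [pvVGet_replicate hi hin hj hjn]
      simp [PySem.Set.empty]
    · exact PySem.Dict.nodup_keys_insert _ _ _ PySem.Dict.nodup_keys_empty
    · intro v c hvc
      rw [PySem.Dict.get?_insert] at hvc
      split at hvc
      · rename_i hv0
        rw [hv0]
        exact pvVGet_replicate le_rfl (by simp; exact_mod_cast hL) le_rfl (by simp; exact_mod_cast hL)
      · rw [PySem.Dict.get?_empty] at hvc
        simp at hvc
    · intro c i j hcij _
      have hc : c = 0 ∧ i = 0 ∧ j = 0 := by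
        simp at hcij
        exact hcij
      refine ⟨0, ?_, by omega⟩
      rw [hc.2.1, hc.2.2, PySem.Dict.get?_insert_self]
    · intro v c hvc
      rw [PySem.Dict.get?_insert] at hvc
      split at hvc
      · rename_i hv0
        have hcc : c = 0 := by injection hvc with hh; exact hh.symm
        rw [hv0, hcc]
        simp
      · rw [PySem.Dict.get?_empty] at hvc
        simp at hvc
  have hk : pvCountFalse (List.replicate land.length (List.replicate land.length false))
      ≤ (((land.length : Int)) * ((land.length : Int))).toNat := by
    rw [pvCountFalse_replicate]
    have : (((land.length : Int)) * ((land.length : Int))).toNat = land.length * land.length := by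
      omega
    omega
  exact pv_main land height _ _ _ _ 0 _ hinv hk
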